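-- pv_equiv track=rewrite | github.com/tritaistevenpham/python-challenges | second_vowel.py | second_vowel
-- ===== SOURCE A (Python) =====
-- def second_vowel(s: str) -> int:
--     # Returns the INDEX of the second vowel in 's', if none return -1
--     # A vowel is defined as 'aeiou' and a 'y' that isn't the first character
--     # Examples:
--     #   second_vowel('test') -> -1
--     #   second_vowel('aeiou') -> 1
--     #   second_vowel('slowly') -> 5
--     #   second_vowel('yip') -> -1
--     vowels = 'aAeEiIoOuUyY'
--     pos = 0
--     num_vowels = 0
--     exit_cond = False
--
--     # Reduce the num_vowels by 1 if string starts with y/Y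
--     if s[0] in 'yY':
--         num_vowels -= 1
--
--     # For each character in input string
--     if not exit_cond:
--         for ch in s:
--             # If character contains a vowel:
--             if ch in vowels:
--                 # Increment number of vowels
--                 num_vowels += 1
--                 if num_vowels == 2:
--                     # We only care about the second vowel
--                     break
--             # Finally update position
--             pos += 1
--
--     # If number of vowels is less than 2, this means we can't find a second vowel
--     if num_vowels < 2:
--         exit_cond = True
--
--     if exit_cond:
--         pos = -1
--
--     return pos
-- ===== SOURCE B (Python) =====
-- def second_vowel(s: str) -> int:
--     # collect all vowel positions once; leading y/Y is not a vowel
--     idxs = [i for i, ch in enumerate(s)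
--             if ch in 'aAeEiIoOuUyY' and not (i == 0 and ch in 'yY')]
--     return idxs[1] if len(idxs) > 1 else -1
-- ===== Notes on version B (the rewrite author's own statement) =====
-- stated objective: simpler
-- what changed: Replaced the running-counter loop with break, leading-y pre-decrement and exit flag by a single comprehension collecting all vowel indices (excluding a leading y/Y) and returning the element at position 1, or -1 if there are fewer than two.
import Mathlib
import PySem

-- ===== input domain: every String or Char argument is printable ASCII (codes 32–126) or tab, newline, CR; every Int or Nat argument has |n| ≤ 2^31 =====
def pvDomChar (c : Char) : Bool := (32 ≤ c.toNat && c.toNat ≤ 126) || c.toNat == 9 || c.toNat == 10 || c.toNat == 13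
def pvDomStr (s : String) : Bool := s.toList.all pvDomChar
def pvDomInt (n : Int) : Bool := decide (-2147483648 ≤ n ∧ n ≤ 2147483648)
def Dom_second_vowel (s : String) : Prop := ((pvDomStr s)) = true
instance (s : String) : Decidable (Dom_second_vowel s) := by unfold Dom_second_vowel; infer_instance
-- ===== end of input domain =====

-- B collects all vowel indices in one comprehension and picks the second, instead of A's
-- running counter with break and exit flag (objective: simpler).

-- ===== PORT A =====
def pvVowelsA : List Char := "aAeEiIoOuUyY".toList

-- the for-loop: state (pos, num_vowels); stops (break) when num_vowels reaches 2
def pvLoopA : List Char → Int → Int → Int × Int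
  | [], pos, nv => (pos, nv)
  | ch :: rest, pos, nv =>
    if ch ∈ pvVowelsA then
      if nv + 1 = 2 then (pos, nv + 1)
      else pvLoopA rest (pos + 1) (nv + 1)
    else pvLoopA rest (pos + 1) nv

def second_vowel (s : String) : Int :=
  match PySem.List.pyGet? s.toList 0 with
  | none => -1   -- Python raises IndexError here (s[0] on empty string); excluded by Pre_
  | some c =>
    let nv0 : Int := if c ∈ ['y', 'Y'] then -1 else 0
    let r := pvLoopA s.toList 0 nv0
    if r.2 < 2 then -1 else r.1

-- ===== PORT B =====
def second_vowel_alt (s : String) : Int :=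
  let idxs := ((PySem.List.enumerate s.toList 0).filter
      (fun p => ("aAeEiIoOuUyY".toList.contains p.2) &&
                !(p.1 == 0 && (p.2 == 'y' || p.2 == 'Y')))).map (·.1)
  if 1 < idxs.length then idxs.getD 1 (-1) else -1

-- ===== PRECONDITION & SPEC =====
-- Pre_ excludes exactly the empty string, on which A's s[0] raises IndexError.
def Pre_second_vowel (s : String) : Prop := s.toList ≠ []
instance (s : String) : Decidable (Pre_second_vowel s) := by unfold Pre_second_vowel; infer_instance
def pvWitness_second_vowel : String := ("slowly")


def Spec_second_vowel (s : String) (out : Int) : Prop := out = second_vowel_alt s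
instance (s : String) (out : Int) : Decidable (Spec_second_vowel s out) := by unfold Spec_second_vowel; infer_instance

-- ===== CLAIM (what is proved, stated in full; the proofs are below) =====
def Claim_equal_second_vowel : Prop := ∀ (s : String), Dom_second_vowel s → Pre_second_vowel s → Spec_second_vowel s (second_vowel s)

-- ===== LEMMAS AND PROOFS =====

-- proof-side characterisation: the (Int) indices of vowel characters of cs, positions starting at p
def pvVIdx : List Char → Int → List Int
  | [], _ => []
  | c :: r, p => if c ∈ pvVowelsA then p :: pvVIdx r (p + 1) else pvVIdx r (p + 1)

lemma pvLoopA_spec (cs : List Char) : ∀ (p n : Int), n ≤ 1 →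
    (if (pvLoopA cs p n).2 < 2 then -1 else (pvLoopA cs p n).1)
      = (pvVIdx cs p).getD (1 - n).toNat (-1) := by
  induction cs with
  | nil =>
    intro p n hn
    simp [pvLoopA, pvVIdx]
    omega
  | cons c r ih =>
    intro p n hn
    by_cases hv : c ∈ pvVowelsA
    · by_cases h2 : n + 1 = 2
      · have hn1 : n = 1 := by omega
        simp [pvLoopA, pvVIdx, hv, hn1]
      · have hk : (1 - n).toNat = (1 - (n + 1)).toNat + 1 := by omega
        rw [show pvLoopA (c :: r) p n = pvLoopA r (p + 1) (n + 1) by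
          simp [pvLoopA, hv, h2]]
        rw [ih (p + 1) (n + 1) (by omega), hk]
        simp [pvVIdx, hv]
    · rw [show pvLoopA (c :: r) p n = pvLoopA r (p + 1) n by simp [pvLoopA, hv]]
      rw [ih (p + 1) n hn]
      simp [pvVIdx, hv]

lemma pvFilt (cs : List Char) : ∀ (n : Int), 1 ≤ n →
    ((PySem.List.enumerate cs n).filter
      (fun p => ("aAeEiIoOuUyY".toList.contains p.2) &&
                !(p.1 == 0 && (p.2 == 'y' || p.2 == 'Y')))).map (·.1) = pvVIdx cs n := by
  induction cs with
  | nil => intro n hn; simp [PySem.List.enumerate_nil, pvVIdx]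
  | cons c r ih =>
    intro n hn
    rw [PySem.List.enumerate_cons, List.filter_cons]
    have hne : (n == 0) = false := by simp; omega
    have hp : (("aAeEiIoOuUyY".toList.contains (n, c).2) &&
        !((n, c).1 == 0 && ((n, c).2 == 'y' || (n, c).2 == 'Y')))
        = "aAeEiIoOuUyY".toList.contains c := by
      simp only [hne, Bool.false_and, Bool.not_false, Bool.and_true]
    rw [hp]
    by_cases hv : c ∈ pvVowelsA
    · have hc : "aAeEiIoOuUyY".toList.contains c = true := by
        simpa [pvVowelsA] using hv
      rw [hc, if_pos rfl, List.map_cons, ih (n + 1) (by omega)]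
      simp [pvVIdx, hv]
    · have hc : "aAeEiIoOuUyY".toList.contains c = false := by
        simpa [pvVowelsA] using hv
      rw [hc]
      simp only [Bool.false_eq_true, if_false]
      rw [ih (n + 1) (by omega)]
      simp [pvVIdx, hv]

-- B's final 'if 1 < len then idxs[1] else -1' is just getD with default -1
lemma pvGetD_if (l : List Int) :
    (if 1 < l.length then l.getD 1 (-1) else -1) = l.getD 1 (-1) := by
  split_ifs with h
  · rfl
  · rw [List.getD_eq_getElem?_getD, List.getElem?_eq_none (by omega)]; rfl

lemma pvAlt_eq (s : String) :
    second_vowel_alt s =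
      (((PySem.List.enumerate s.toList 0).filter
        (fun p => ("aAeEiIoOuUyY".toList.contains p.2) &&
                  !(p.1 == 0 && (p.2 == 'y' || p.2 == 'Y')))).map (·.1)).getD 1 (-1) := by
  unfold second_vowel_alt
  exact pvGetD_if _

-- ===== VERDICT (by name: the statement is the Claim_ definition above) =====
theorem second_vowel_spec : Claim_equal_second_vowel := by
  intro s _ hpre
  unfold Spec_second_vowel
  rw [pvAlt_eq]
  obtain ⟨c, r, hcs⟩ : ∃ c r, s.toList = c :: r := by
    cases h : s.toList with
    | nil => exact absurd h hpre
    | cons c r => exact ⟨c, r, rfl⟩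
  unfold second_vowel
  rw [hcs, PySem.List.enumerate_cons, List.filter_cons]
  rw [show PySem.List.pyGet? (c :: r) 0 = some c by
    simp [PySem.List.pyGet?, PySem.List.pyIdx?]]
  simp only []
  by_cases hy : c ∈ ['y', 'Y']
  · -- leading y/Y: excluded from B's list; A starts the counter at -1
    simp only [List.mem_cons, List.not_mem_nil, or_false] at hy
    have hv : c ∈ pvVowelsA := by
      rcases hy with h | h <;> subst h <;> decide
    have hb : (("aAeEiIoOuUyY".toList.contains ((0 : Int), c).2) &&
        !(((0 : Int), c).1 == 0 && (((0 : Int), c).2 == 'y' || ((0 : Int), c).2 == 'Y')))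
        = false := by
      rcases hy with h | h <;> subst h <;> decide
    rw [hb]
    simp only [Bool.false_eq_true, if_false]
    rw [pvFilt r (0 + 1) (by omega)]
    have hA := pvLoopA_spec (c :: r) 0 (-1) (by omega)
    rw [show pvVIdx (c :: r) 0 = 0 :: pvVIdx r (0 + 1) by simp [pvVIdx, hv]] at hA
    have hy' : (if c ∈ ['y', 'Y'] then (-1 : Int) else 0) = -1 := by
      rcases hy with h | h <;> subst h <;> decide
    rw [hy']
    rw [hA]
    simp
  · -- no leading y/Y: B's head predicate is plain vowel membership
    simp only [List.mem_cons, List.not_mem_nil, or_false,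
      not_or] at hy
    obtain ⟨hy1, hy2⟩ := hy
    have hb : (("aAeEiIoOuUyY".toList.contains ((0 : Int), c).2) &&
        !(((0 : Int), c).1 == 0 && (((0 : Int), c).2 == 'y' || ((0 : Int), c).2 == 'Y')))
        = "aAeEiIoOuUyY".toList.contains c := by
      have h1 : (c == 'y') = false := by simpa using hy1
      have h2 : (c == 'Y') = false := by simpa using hy2
      simp [h1, h2]
    rw [hb]
    have hy' : (if c ∈ ['y', 'Y'] then (-1 : Int) else 0) = 0 := by
      simp [hy1, hy2]
    rw [hy']
    have hA := pvLoopA_spec (c :: r) 0 0 (by omega)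
    by_cases hv : c ∈ pvVowelsA
    · have hc : "aAeEiIoOuUyY".toList.contains c = true := by
        simpa [pvVowelsA] using hv
      rw [show pvVIdx (c :: r) 0 = 0 :: pvVIdx r (0 + 1) by simp [pvVIdx, hv]] at hA
      rw [hc, if_pos rfl, List.map_cons, pvFilt r (0 + 1) (by omega), hA]
      simp
    · have hc : "aAeEiIoOuUyY".toList.contains c = false := by
        simpa [pvVowelsA] using hv
      rw [show pvVIdx (c :: r) 0 = pvVIdx r (0 + 1) by simp [pvVIdx, hv]] at hA
      rw [hc]
      simp only [Bool.false_eq_true, if_false]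
      rw [pvFilt r (0 + 1) (by omega), hA]
      simp
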